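-- pv_equiv track=rewrite | github.com/csestelo/advent_of_code | 2021/day-3/part_1.py | count_bit_occurrencies
-- ===== SOURCE A (Python) =====
-- from collections import defaultdict
-- from typing import Dict, Iterable, List
--
-- def count_bit_occurrencies(report: Iterable) -> Dict[int, int]:
--     counter = defaultdict(int)
--
--     for line in report:
--         for idx, bit in enumerate(line.strip()):
--             if bit == '0':
--                 counter[idx] -= 1
--             else:
--                 counter[idx] += 1
--     return counter
-- ===== SOURCE B (Python) =====
-- def count_bit_occurrencies(report):
--     lines = [line.strip() for line in report]
--     maxlen = max((len(l) for l in lines), default=0)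
--     return {
--         idx: sum(-1 if l[idx] == '0' else 1 for l in lines if idx < len(l))
--         for idx in range(maxlen)
--     }
-- ===== Notes on version B (the rewrite author's own statement) =====
-- stated objective: alternative
-- what changed: Row-by-row accumulation into a defaultdict is replaced by a column-first computation: strip the lines once, take the maximum length, and build each column's tally directly with a dict comprehension over the column indices, counting only lines long enough to reach the column.
import Mathlib
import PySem

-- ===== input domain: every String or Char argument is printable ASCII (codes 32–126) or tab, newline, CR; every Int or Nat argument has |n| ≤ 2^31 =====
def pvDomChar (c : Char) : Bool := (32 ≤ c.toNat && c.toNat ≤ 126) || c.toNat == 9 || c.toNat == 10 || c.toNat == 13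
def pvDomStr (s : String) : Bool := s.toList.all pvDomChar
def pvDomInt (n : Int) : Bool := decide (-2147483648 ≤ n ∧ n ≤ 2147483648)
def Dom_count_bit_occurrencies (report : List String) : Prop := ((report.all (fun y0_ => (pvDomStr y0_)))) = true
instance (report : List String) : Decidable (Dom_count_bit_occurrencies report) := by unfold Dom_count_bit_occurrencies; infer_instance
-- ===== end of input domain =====

-- Header: B tallies column-first (max line length, then one pass per column index) instead of
-- A's row-by-row defaultdict accumulation; objective: alternative decomposition, same cost class.


-- ===== PORT A =====
def count_bit_occurrencies (report : List String) : List (Int × Int) :=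
  (report.foldl
    (fun counter line =>
      (PySem.List.enumerate (PySem.Str.strip line).toList).foldl
        (fun c p =>
          if p.2 = '0' then c.modify p.1 0 (fun x => x - 1)
          else c.modify p.1 0 (fun x => x + 1))
        counter)
    PySem.Dict.empty).items

-- ===== PORT B =====
-- column tally: sum of -1 / +1 over the lines that reach column i
def altCol (lines : List (List Char)) (i : Nat) : Int :=
  ((lines.filter (fun l => decide (i < l.length))).map
    (fun l => if l.getD i ' ' = '0' then (-1 : Int) else 1)).sum

def count_bit_occurrencies_alt (report : List String) : List (Int × Int) :=
  let lines := report.map (fun s => (PySem.Str.strip s).toList)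
  let maxlen := PySem.List.maxD (lines.map (fun l => l.length)) id 0
  (List.range maxlen).map (fun (i : Nat) => (((i : Nat) : Int), altCol lines i))

-- ===== PRECONDITION & SPEC =====
def Spec_count_bit_occurrencies (report : List String) (out : List (Int × Int)) : Prop := out = count_bit_occurrencies_alt report
instance (report : List String) (out : List (Int × Int)) : Decidable (Spec_count_bit_occurrencies report out) := by unfold Spec_count_bit_occurrencies; infer_instance

-- ===== CLAIM (what is proved, stated in full; the proofs are below) =====
def Claim_equal_count_bit_occurrencies : Prop := ∀ (report : List String), Dom_count_bit_occurrencies report → Spec_count_bit_occurrencies report (count_bit_occurrencies report)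

-- ===== LEMMAS AND PROOFS =====

-- contribution of one bit character
def contribC (c : Char) : Int := if c = '0' then -1 else 1

-- contribution of a line (whose first character sits at column kn) to column i
def cFN : Nat → List Char → Nat → Int
  | _, [], _ => 0
  | kn, c :: cs, i => (if i = kn then contribC c else 0) + cFN (kn + 1) cs i

-- the canonical dict item list: keys s, s+1, …, s+n-1 with values v
def canon : Nat → Nat → (Nat → Int) → List (Int × Int)
  | _, 0, _ => []
  | s, n + 1, v => (((s : Nat) : Int), v s) :: canon (s + 1) n v

lemma canon_congr (s n : Nat) (v w : Nat → Int)
    (h : ∀ i, s ≤ i → i < s + n → v i = w i) : canon s n v = canon s n w := by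
  induction n generalizing s with
  | zero => rfl
  | succ n ih =>
    simp only [canon]
    rw [h s le_rfl (by omega), ih (s+1) (fun i h1 h2 => h i (by omega) (by omega))]

lemma canon_eq_range' (s n : Nat) (v : Nat → Int) :
    canon s n v = (List.range' s n).map (fun (i : Nat) => (((i : Nat) : Int), v i)) := by
  induction n generalizing s with
  | zero => rfl
  | succ n ih =>
    rw [List.range'_succ, List.map_cons]
    show (((s : Nat) : Int), v s) :: canon (s + 1) n v = _
    rw [ih (s + 1)]

lemma find?_canon (s n j : Nat) (v : Nat → Int) :
    List.find? (fun p => p.1 == ((j : Nat) : Int)) (canon s n v)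
      = if s ≤ j ∧ j < s + n then some (((j : Nat) : Int), v j) else none := by
  induction n generalizing s with
  | zero => simp [canon]
  | succ n ih =>
    simp only [canon, List.find?]
    by_cases hsj : s = j
    · subst hsj
      simp
    · have hb : (((s : Nat) : Int) == ((j : Nat) : Int)) = false := by
        simp only [beq_eq_false_iff_ne, ne_eq, Nat.cast_inj]
        omega
      simp only [hb, ih (s+1)]
      have h1 : (s + 1 ≤ j ∧ j < s + 1 + n) ↔ (s ≤ j ∧ j < s + (n+1)) := by omega
      rw [if_congr h1 rfl rfl]

lemma getD_canon (s n j : Nat) (v : Nat → Int) :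
    (PySem.Dict.mk (canon s n v)).getD ((j : Nat) : Int) 0
      = if s ≤ j ∧ j < s + n then v j else 0 := by
  simp only [PySem.Dict.getD, PySem.Dict.get?, find?_canon]
  split_ifs <;> rfl

lemma contains_canon (s n j : Nat) (v : Nat → Int) :
    (PySem.Dict.mk (canon s n v)).contains ((j : Nat) : Int)
      = decide (s ≤ j ∧ j < s + n) := by
  simp only [PySem.Dict.contains]
  rw [Eq.symm List.isSome_find?, find?_canon]
  split_ifs with h <;> simp [h]

lemma map_overwrite_canon (s n j : Nat) (x : Int) (v : Nat → Int) :
    List.map (fun p => if p.1 == ((j : Nat) : Int) then (((j : Nat) : Int), x) else p) (canon s n v)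
      = canon s n (fun i => if i = j then x else v i) := by
  induction n generalizing s with
  | zero => rfl
  | succ n ih =>
    simp only [canon, List.map_cons, List.cons.injEq]
    refine ⟨?_, ih (s + 1)⟩
    · by_cases hsj : s = j
      · subst hsj; simp
      · have hb : (((s : Nat) : Int) == ((j : Nat) : Int)) = false := by
          simp only [beq_eq_false_iff_ne, ne_eq, Nat.cast_inj]; omega
        simp [hb, hsj]

lemma canon_append (s n : Nat) (x : Int) (v : Nat → Int) :
    canon s n v ++ [(((s + n : Nat) : Int), x)]
      = canon s (n + 1) (fun i => if i = s + n then x else v i) := by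
  induction n generalizing s with
  | zero => simp [canon]
  | succ n ih =>
    simp only [canon, List.cons_append, List.cons.injEq]
    refine ⟨by simp, ?_⟩
    have := ih (s + 1)
    rw [show s + 1 + n = s + (n + 1) by omega] at this
    exact this

lemma insert_canon (n j : Nat) (x : Int) (v : Nat → Int) (hj : j ≤ n) :
    (PySem.Dict.mk (canon 0 n v)).insert ((j : Nat) : Int) x
      = PySem.Dict.mk (canon 0 (max n (j + 1)) (fun i => if i = j then x else v i)) := by
  simp only [PySem.Dict.insert, contains_canon]
  by_cases h : j < n
  · rw [show max n (j + 1) = n by omega]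
    rw [if_pos (decide_eq_true (show 0 ≤ j ∧ j < 0 + n by omega))]
    exact congrArg PySem.Dict.mk (map_overwrite_canon 0 n j x v)
  · have hjn : j = n := by omega
    subst hjn
    rw [if_neg (by rw [decide_eq_false (show ¬(0 ≤ j ∧ j < 0 + j) by omega)]; exact Bool.false_ne_true)]
    rw [show max j (j + 1) = j + 1 by omega]
    rw [show ((j : Nat) : Int) = ((0 + j : Nat) : Int) by simp, canon_append 0 j x v]
    exact congrArg PySem.Dict.mk (canon_congr _ _ _ _ (fun i _ _ => by simp))

lemma modify_canon (n j : Nat) (f : Int → Int) (v : Nat → Int) (hj : j ≤ n) :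
    (PySem.Dict.mk (canon 0 n v)).modify ((j : Nat) : Int) 0 f
      = PySem.Dict.mk (canon 0 (max n (j + 1))
          (fun i => if i = j then f (if j < n then v j else 0) else v i)) := by
  simp only [PySem.Dict.modify]
  rw [insert_canon n j _ v hj, getD_canon]
  refine congrArg PySem.Dict.mk (canon_congr _ _ _ _ (fun i _ _ => ?_))
  by_cases hij : i = j
  · have h2 : (0 ≤ j ∧ j < 0 + n) ↔ j < n := by omega
    rw [if_pos hij, if_pos hij, if_congr h2 rfl rfl]
  · simp [hij]

lemma cFN_eq_zero (kn : Nat) (cs : List Char) (i : Nat)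
    (h : i < kn ∨ kn + cs.length ≤ i) : cFN kn cs i = 0 := by
  induction cs generalizing kn with
  | nil => rfl
  | cons c cs ih =>
    simp only [cFN]
    rw [if_neg (by simp at h ⊢; omega), ih (kn + 1) (by simp at h ⊢; omega)]
    ring

lemma cFN_spec (kn : Nat) (cs : List Char) (i : Nat) :
    cFN kn cs i = if kn ≤ i ∧ i < kn + cs.length then contribC (cs.getD (i - kn) ' ') else 0 := by
  induction cs generalizing kn with
  | nil => simp [cFN]
  | cons c cs ih =>
    simp only [cFN, ih (kn + 1)]
    by_cases hik : i = kn
    · subst hik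
      simp [List.getD]
    · rw [if_neg hik]
      by_cases h2 : kn + 1 ≤ i ∧ i < kn + 1 + cs.length
      · rw [if_pos h2, if_pos (by simp; omega)]
        have : i - kn = (i - (kn + 1)) + 1 := by omega
        simp [this, List.getD]
      · rw [if_neg h2, if_neg (by simp at h2 ⊢; omega)]
        ring

-- one line folded into a canonical dict
lemma inner_fold (cs : List Char) (kn n : Nat) (v : Nat → Int)
    (hkn : kn ≤ n) (hv : ∀ i, n ≤ i → v i = 0) :
    (PySem.List.enumerate cs ((kn : Nat) : Int)).foldl
        (fun c p =>
          if p.2 = '0' then c.modify p.1 0 (fun x => x - 1)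
          else c.modify p.1 0 (fun x => x + 1))
        (PySem.Dict.mk (canon 0 n v))
      = PySem.Dict.mk (canon 0 (max n (kn + cs.length)) (fun i => v i + cFN kn cs i)) := by
  induction cs generalizing kn n v with
  | nil =>
    simp only [PySem.List.enumerate_nil, List.foldl_nil, List.length_nil, Nat.add_zero,
      Nat.max_eq_left hkn]
    congr 1
    exact canon_congr _ _ _ _ (fun i _ _ => by simp [cFN])
  | cons c cs ih =>
    rw [PySem.List.enumerate_cons]
    simp only [List.foldl_cons]
    have hstep :
        (if c = '0'
          then (PySem.Dict.mk (canon 0 n v)).modify ((kn : Nat) : Int) 0 (fun x => x - 1)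
          else (PySem.Dict.mk (canon 0 n v)).modify ((kn : Nat) : Int) 0 (fun x => x + 1))
          = PySem.Dict.mk (canon 0 (max n (kn + 1))
              (fun i => if i = kn then (if kn < n then v kn else 0) + contribC c else v i)) := by
      by_cases hc : c = '0'
      · rw [if_pos hc, modify_canon n kn _ v hkn]
        refine congrArg PySem.Dict.mk (canon_congr _ _ _ _ (fun i _ _ => ?_))
        by_cases hik : i = kn
        · rw [if_pos hik, if_pos hik, show contribC c = -1 by simp [contribC, hc]]
          ring
        · rw [if_neg hik, if_neg hik]
      · rw [if_neg hc, modify_canon n kn _ v hkn]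
        refine congrArg PySem.Dict.mk (canon_congr _ _ _ _ (fun i _ _ => ?_))
        by_cases hik : i = kn
        · rw [if_pos hik, if_pos hik, show contribC c = 1 by simp [contribC, hc]]
        · rw [if_neg hik, if_neg hik]
    rw [show ((kn : Nat) : Int) + 1 = (((kn + 1 : Nat)) : Int) by push_cast; ring]
    rw [hstep, ih (kn + 1) (max n (kn + 1)) _ (by omega)
      (fun i hi => by
        have h1 : i ≠ kn := by omega
        simp [h1, hv i (by omega)])]
    congr 1
    rw [show max (max n (kn + 1)) (kn + 1 + cs.length) = max n (kn + (c :: cs).length) by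
      simp; omega]
    refine canon_congr _ _ _ _ (fun i _ _ => ?_)
    by_cases hik : i = kn
    · rw [hik, if_pos rfl]
      simp only [cFN, if_true]
      rw [cFN_eq_zero (kn + 1) cs kn (by omega)]
      by_cases h2 : kn < n
      · rw [if_pos h2]; ring
      · rw [if_neg h2, hv kn (by omega)]; ring
    · simp only [cFN, if_neg hik]
      ring

-- total contribution of a list of lines to column i
def colSum (ls : List (List Char)) (i : Nat) : Int :=
  (ls.map (fun l => cFN 0 l i)).sum

lemma outer_fold (ls : List (List Char)) (n : Nat) (v : Nat → Int)
    (hv : ∀ i, n ≤ i → v i = 0) :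
    ls.foldl
        (fun counter l =>
          (PySem.List.enumerate l).foldl
            (fun c p =>
              if p.2 = '0' then c.modify p.1 0 (fun x => x - 1)
              else c.modify p.1 0 (fun x => x + 1))
            counter)
        (PySem.Dict.mk (canon 0 n v))
      = PySem.Dict.mk (canon 0 (ls.foldl (fun m l => max m l.length) n)
          (fun i => v i + colSum ls i)) := by
  induction ls generalizing n v with
  | nil =>
    simp only [List.foldl_nil]
    congr 1
    exact canon_congr _ _ _ _ (fun i _ _ => by simp [colSum])
  | cons l ls ih =>
    simp only [List.foldl_cons]
    have h0 : ((0 : Nat) : Int) = (0 : Int) := rfl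
    rw [show (PySem.List.enumerate l : List (Int × Char)) = PySem.List.enumerate l ((0 : Nat) : Int) by rfl]
    rw [inner_fold l 0 n v (Nat.zero_le n) hv]
    simp only [Nat.zero_add]
    rw [ih (max n l.length) _
      (fun i hi => by
        rw [hv i (by omega), cFN_eq_zero 0 l i (by omega)]
        ring)]
    congr 1
    refine canon_congr _ _ _ _ (fun i _ _ => ?_)
    simp [colSum]
    ring

lemma maxD_eq_foldl (ns : List Nat) :
    PySem.List.maxD ns id 0 = ns.foldl max 0 := by
  cases ns with
  | nil => rfl
  | cons n ns =>
    simp only [PySem.List.maxD, PySem.List.max?, List.foldl_cons]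
    rw [show max 0 n = n from Nat.zero_max n]
    induction ns generalizing n with
    | nil => rfl
    | cons k ks ih =>
      simp only [List.foldl_cons, id_eq]
      split_ifs with h
      · rw [show max n k = k by omega]
        exact ih k
      · rw [show max n k = n by omega]
        exact ih n

lemma colSum_eq_altCol (ls : List (List Char)) (i : Nat) :
    colSum ls i = altCol ls i := by
  induction ls with
  | nil => rfl
  | cons l ls ih =>
    simp only [colSum, altCol, List.map_cons, List.sum_cons] at *
    rw [cFN_spec 0 l i]
    by_cases h : i < l.length
    · simp [h, contribC, ih]
    · simp [h, ih]

-- ===== VERDICT (by name: the statement is the Claim_ definition above) =====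
theorem count_bit_occurrencies_spec : Claim_equal_count_bit_occurrencies := by
  intro report _
  unfold Spec_count_bit_occurrencies count_bit_occurrencies count_bit_occurrencies_alt
  have key := outer_fold (report.map (fun s => (PySem.Str.strip s).toList)) 0
    (fun _ => 0) (fun _ _ => rfl)
  simp only [List.foldl_map] at key
  rw [show (PySem.Dict.empty : PySem.Dict Int Int)
      = PySem.Dict.mk (canon 0 0 (fun _ => 0)) from rfl, key]
  simp only []
  rw [maxD_eq_foldl, canon_eq_range', List.range_eq_range']
  have hlen : (List.map (fun l => l.length) (report.map (fun s => (PySem.Str.strip s).toList))).foldl max 0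
      = report.foldl (fun m s => max m (PySem.Str.strip s).toList.length) 0 := by
    simp only [List.map_map, List.foldl_map]
    rfl
  rw [hlen]
  refine List.map_congr_left (fun i _ => ?_)
  rw [colSum_eq_altCol]
  rw [show (0 : Int) + altCol (report.map (fun s => (PySem.Str.strip s).toList)) i
      = altCol (report.map (fun s => (PySem.Str.strip s).toList)) i by ring]
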